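-- pv_equiv track=rewrite | github.com/e-tellez/analisis_datos_covid | utilities/manejo_datos.py | dame_contagios_acumulados_por_estado
-- ===== SOURCE A (Python) =====
-- def quita_clave_fecha(datos: list):
--     """
--     Se quita la clave y la fecha del set de datos
--     """
--
--     datos_sin_clave_fecha = []
--     for i in range(1, len(datos)):
--         renglon = []
--         for j in range(len(datos[i])):
--             if j > 0:
--                 if j == 2:
--                     renglon.append(datos[i][j])
--                 else:
--                     renglon.append(int(datos[i][j]))
--         datos_sin_clave_fecha.append(renglon)
--
--     return datos_sin_clave_fecha
--
-- def dame_contagios_acumulados_por_estado(datos: list):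
--     """
--     se arrojan los contagios acumulados en un array que devuelve estado/acumulacion/poblacion
--     """
--
--     datos_sin_clave_fecha = quita_clave_fecha(datos)
--
--     contagios_acumulados_por_estado = []
--
--     for i in range(len(datos_sin_clave_fecha)):
--         acumulacion = 0
--         renglon = []
--         for j in range(2, len(datos_sin_clave_fecha[i])):
--             if j > 0:
--                 acumulacion += datos_sin_clave_fecha[i][j]
--
--         contagios_acumulados_por_estado.append([
--             datos_sin_clave_fecha[i][1],  # estado
--             datos_sin_clave_fecha[i][0],  # poblacion
--             acumulacion  # numero de contagiados
--         ])
--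
--     return contagios_acumulados_por_estado
-- ===== SOURCE B (Python) =====
-- def dame_contagios_acumulados_por_estado(datos: list):
--     """
--     se arrojan los contagios acumulados en un array que devuelve estado/acumulacion/poblacion
--     """
--     return [[row[2], int(row[1]), sum(int(x) for x in row[3:])]
--             for row in datos[1:]]
-- ===== Notes on version B (the rewrite author's own statement) =====
-- stated objective: simpler
-- what changed: Replaces A's two-phase pipeline (build an intermediate typed matrix with a helper, then rescan it by index to sum) with a single direct comprehension over datos[1:] that never materializes the intermediate matrix.
import Mathlib
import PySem

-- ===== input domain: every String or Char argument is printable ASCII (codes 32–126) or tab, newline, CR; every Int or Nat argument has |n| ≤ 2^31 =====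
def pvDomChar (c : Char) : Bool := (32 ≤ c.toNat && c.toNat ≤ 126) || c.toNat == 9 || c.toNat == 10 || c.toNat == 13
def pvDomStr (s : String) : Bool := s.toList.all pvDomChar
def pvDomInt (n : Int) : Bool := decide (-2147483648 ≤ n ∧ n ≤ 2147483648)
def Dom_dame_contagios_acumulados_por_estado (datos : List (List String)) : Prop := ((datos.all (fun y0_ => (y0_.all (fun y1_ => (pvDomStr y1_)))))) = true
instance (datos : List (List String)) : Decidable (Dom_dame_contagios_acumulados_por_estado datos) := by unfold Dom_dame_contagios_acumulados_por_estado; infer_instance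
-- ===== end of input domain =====

-- B drops A's helper and intermediate matrix: one direct comprehension over datos[1:] (simpler, same cost).

-- ===== PORT A =====
-- A's intermediate matrix rows mix ints and strings; Cell models that dynamic typing.
inductive Cell
  | int (n : Int)
  | str (s : String)
deriving DecidableEq, Repr

-- reading an element that is in fact an int / a string; the defaults are only reached outside Pre_
def cellInt (c : Cell) : Int := match c with | .int n => n | .str _ => 0
def cellStr (c : Cell) : String := match c with | .str s => s | .int _ => ""

-- int(s); the default 0 is only reached outside Pre_ (where Python raises ValueError)
def pyInt (s : String) : Int := (PySem.Int.ofStr? s).getD 0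

def quita_clave_fecha (datos : List (List String)) : List (List Cell) :=
  (PySem.List.pyRange 1 (PySem.List.len datos)).foldl (fun acc i =>
    acc ++ [(PySem.List.pyRange 0 (PySem.List.len (PySem.List.pyGetD datos i []))).foldl (fun r j =>
      if j > 0 then
        if j = 2 then r ++ [Cell.str (PySem.List.pyGetD (PySem.List.pyGetD datos i []) j "")]
        else r ++ [Cell.int (pyInt (PySem.List.pyGetD (PySem.List.pyGetD datos i []) j ""))]
      else r) []]) []

def acumRow (fila : List Cell) : Int :=
  (PySem.List.pyRange 2 (PySem.List.len fila)).foldl (fun a j =>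
    if j > 0 then a + cellInt (PySem.List.pyGetD fila j (Cell.int 0)) else a) 0

-- the main loop of A, over the matrix computed once by the helper
def dameLoop (dscf : List (List Cell)) : List (String × Int × Int) :=
  (PySem.List.pyRange 0 (PySem.List.len dscf)).foldl (fun acc i =>
    acc ++ [(cellStr (PySem.List.pyGetD (PySem.List.pyGetD dscf i []) 1 (Cell.int 0)),
             cellInt (PySem.List.pyGetD (PySem.List.pyGetD dscf i []) 0 (Cell.int 0)),
             acumRow (PySem.List.pyGetD dscf i []))]) []

def dame_contagios_acumulados_por_estado (datos : List (List String)) : List (String × Int × Int) :=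
  dameLoop (quita_clave_fecha datos)

-- ===== PORT B =====
def dame_contagios_acumulados_por_estado_alt (datos : List (List String)) : List (String × Int × Int) :=
  (PySem.List.slice datos (some 1)).map (fun row =>
    (PySem.List.pyGetD row 2 "",
     pyInt (PySem.List.pyGetD row 1 ""),
     ((PySem.List.slice row (some 3)).map pyInt).sum))

-- ===== PRECONDITION & SPEC =====
-- Exactly where Python A returns: every data row (after the header) has at least 3 columns,
-- its population column (read with an unreachable "0" default, as the length bound makes any getD default unreachable) parses as int, and every column from index 3 on parses as int
-- (otherwise A raises IndexError / ValueError).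
def Pre_dame_contagios_acumulados_por_estado (datos : List (List String)) : Prop :=
  ∀ r ∈ datos.drop 1, 3 ≤ r.length ∧ (PySem.Int.ofStr? (r.getD 1 "0")).isSome = true ∧
    ∀ s ∈ r.drop 3, (PySem.Int.ofStr? s).isSome = true
instance (datos : List (List String)) : Decidable (Pre_dame_contagios_acumulados_por_estado datos) := by
  unfold Pre_dame_contagios_acumulados_por_estado; infer_instance

def pvWitness_dame_contagios_acumulados_por_estado : List (List String) :=
  [["clave", "fecha", "estado"], ["k1", "100", "Ags", "1", "2"], ["k2", "7", "BC", "0"]]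

def Spec_dame_contagios_acumulados_por_estado (datos : List (List String)) (out : List (String × Int × Int)) : Prop := out = dame_contagios_acumulados_por_estado_alt datos
instance (datos : List (List String)) (out : List (String × Int × Int)) : Decidable (Spec_dame_contagios_acumulados_por_estado datos out) := by unfold Spec_dame_contagios_acumulados_por_estado; infer_instance

-- ===== CLAIM (what is proved, stated in full; the proofs are below) =====
def Claim_equal_dame_contagios_acumulados_por_estado : Prop := ∀ (datos : List (List String)), Dom_dame_contagios_acumulados_por_estado datos → Pre_dame_contagios_acumulados_por_estado datos → Spec_dame_contagios_acumulados_por_estado datos (dame_contagios_acumulados_por_estado datos)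

-- ===== LEMMAS AND PROOFS =====

-- B's value on one row (proof helper)
def rowB (r : List String) : String × Int × Int :=
  (PySem.List.pyGetD r 2 "", pyInt (PySem.List.pyGetD r 1 ""), ((r.drop 3).map pyInt).sum)

-- A's helper, row-wise
lemma quita_eq_map (datos : List (List String)) :
    quita_clave_fecha datos = (datos.drop 1).map (fun fila =>
      (PySem.List.pyRange 0 (PySem.List.len fila)).foldl (fun r j =>
        if j > 0 then
          if j = 2 then r ++ [Cell.str (PySem.List.pyGetD fila j "")]
          else r ++ [Cell.int (pyInt (PySem.List.pyGetD fila j ""))]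
        else r) []) := by
  unfold quita_clave_fecha
  exact (PySem.List.foldl_pyRange_pyGetD datos []
      (fun acc fila => acc ++ [(PySem.List.pyRange 0 (PySem.List.len fila)).foldl (fun r j =>
        if j > 0 then
          if j = 2 then r ++ [Cell.str (PySem.List.pyGetD fila j "")]
          else r ++ [Cell.int (pyInt (PySem.List.pyGetD fila j ""))]
        else r) []]) [] (by norm_num)).trans
    (by simpa using PySem.List.foldl_append_singleton_eq_map (fun fila =>
      (PySem.List.pyRange 0 (PySem.List.len fila)).foldl (fun r j =>
        if j > 0 then
          if j = 2 then r ++ [Cell.str (PySem.List.pyGetD fila j "")]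
          else r ++ [Cell.int (pyInt (PySem.List.pyGetD fila j ""))]
        else r) []) (datos.drop 1) [])

-- the cell row built for one data row with ≥ 3 columns
lemma cells_of_long_row (a b c : String) (rest : List String) :
    (PySem.List.pyRange 0 (PySem.List.len (a :: b :: c :: rest))).foldl (fun r j =>
      if j > 0 then
        if j = 2 then r ++ [Cell.str (PySem.List.pyGetD (a :: b :: c :: rest) j "")]
        else r ++ [Cell.int (pyInt (PySem.List.pyGetD (a :: b :: c :: rest) j ""))]
      else r) []
    = Cell.int (pyInt b) :: Cell.str c :: rest.map (fun s => Cell.int (pyInt s)) := by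
  rw [PySem.List.pyRange_one_cons (by simp [PySem.List.len]; omega),
      PySem.List.pyRange_one_cons (by simp [PySem.List.len]; omega),
      PySem.List.pyRange_one_cons (by simp [PySem.List.len]; omega)]
  simp only [List.foldl_cons]
  norm_num [PySem.List.pyGetD_ofNat']
  rw [show ((rest.length : Int) + 1 + 1 + 1) = PySem.List.len (a :: b :: c :: rest) by
        simp [PySem.List.len]]
  rw [PySem.List.foldl_congr_mem _ _
        (fun r j => r ++ [Cell.int (pyInt (PySem.List.pyGetD (a :: b :: c :: rest) j ""))]) _
        (by
          intro acc x hx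
          rw [PySem.List.mem_pyRange_one] at hx
          have h1 : 0 < x := by omega
          have h2 : x ≠ 2 := by omega
          simp [h1, h2])]
  exact (PySem.List.foldl_pyRange_pyGetD (a := 3) (a :: b :: c :: rest) ""
      (fun r s => r ++ [Cell.int (pyInt s)])
      ([Cell.int (pyInt b), Cell.str c]) (by norm_num)).trans
    (by simpa using PySem.List.foldl_append_singleton_eq_map (fun s => Cell.int (pyInt s)) rest [Cell.int (pyInt b), Cell.str c])

-- the accumulation loop over a cell row of the long shape
lemma acum_of_cells (c0 c1 : Cell) (rest : List String) :
    acumRow (c0 :: c1 :: rest.map (fun s => Cell.int (pyInt s))) = (rest.map pyInt).sum := by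
  unfold acumRow
  rw [PySem.List.foldl_congr_mem _ _
        (fun a j => a + cellInt (PySem.List.pyGetD (c0 :: c1 :: rest.map (fun s => Cell.int (pyInt s))) j (Cell.int 0))) _
        (by
          intro acc x hx
          rw [PySem.List.mem_pyRange_one] at hx
          have h1 : x > 0 := by omega
          simp [h1])]
  rw [PySem.List.foldl_pyRange_pyGetD (a := 2) (c0 :: c1 :: rest.map (fun s => Cell.int (pyInt s))) (Cell.int 0)
        (fun a c => a + cellInt c) 0 (by norm_num)]
  rw [PySem.List.foldl_add]
  simp [cellInt, Function.comp_def]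

-- A's value on one cell row
def rowA (filaC : List Cell) : String × Int × Int :=
  (cellStr (PySem.List.pyGetD filaC 1 (Cell.int 0)),
   cellInt (PySem.List.pyGetD filaC 0 (Cell.int 0)),
   acumRow filaC)

lemma dameLoop_eq_map (dscf : List (List Cell)) : dameLoop dscf = dscf.map rowA := by
  unfold dameLoop
  exact (PySem.List.foldl_pyRange_pyGetD (a := 0) dscf []
      (fun acc filaC => acc ++ [(cellStr (PySem.List.pyGetD filaC 1 (Cell.int 0)),
        cellInt (PySem.List.pyGetD filaC 0 (Cell.int 0)), acumRow filaC)]) [] (by norm_num)).trans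
    (by simpa using PySem.List.foldl_append_singleton_eq_map rowA dscf [])

-- per-row agreement of the two programs, for every admissible row
lemma row_eq (fila : List String) (h3 : 3 ≤ fila.length) :
    rowA ((PySem.List.pyRange 0 (PySem.List.len fila)).foldl (fun r j =>
      if j > 0 then
        if j = 2 then r ++ [Cell.str (PySem.List.pyGetD fila j "")]
        else r ++ [Cell.int (pyInt (PySem.List.pyGetD fila j ""))]
      else r) [])
    = rowB fila := by
  match fila, h3 with
  | a :: b :: c :: rest, _ =>
    rw [cells_of_long_row]
    unfold rowA
    rw [acum_of_cells]
    simp [rowB, cellStr, cellInt, PySem.List.pyGetD_ofNat']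

lemma alt_eq_map (datos : List (List String)) :
    dame_contagios_acumulados_por_estado_alt datos = (datos.drop 1).map rowB := by
  unfold dame_contagios_acumulados_por_estado_alt
  rw [PySem.List.slice_from datos (by norm_num)]
  refine List.map_congr_left ?_
  intro r _
  simp [rowB, PySem.List.slice_from r (a := 3) (by norm_num)]

-- ===== VERDICT (by name: the statement is the Claim_ definition above) =====
theorem dame_contagios_acumulados_por_estado_spec : Claim_equal_dame_contagios_acumulados_por_estado := by
  intro datos _ hpre
  unfold Spec_dame_contagios_acumulados_por_estado
  unfold dame_contagios_acumulados_por_estado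
  rw [quita_eq_map, dameLoop_eq_map, alt_eq_map, List.map_map]
  refine List.map_congr_left ?_
  intro fila hmem
  exact row_eq fila (hpre fila hmem).1
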